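-- pv_equiv track=rewrite | github.com/meiiie/wiii | maritime-ai-service/app/engine/multi_agent/direct_visible_thinking_cleanup.py | strip_direct_selfhood_filler_prefix
-- ===== SOURCE A (Python) =====
-- _DIRECT_SELFHOOD_ENGLISH_FILLER_PREFIXES = (
--     "okay,",
--     "okay ",
--     "ok,",
--     "alright,",
--     "let's see",
--     "lets see",
--     "hmm,",
-- )
--
-- def strip_direct_selfhood_filler_prefix(paragraph: str) -> str:
--     clean = str(paragraph or "").strip()
--     if not clean:
--         return ""
--     lowered = clean.lower()
--     for prefix in _DIRECT_SELFHOOD_ENGLISH_FILLER_PREFIXES: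
--         if lowered.startswith(prefix):
--             stripped = clean[len(prefix):].lstrip(" ,.-:;…")
--             if stripped and stripped[0].islower():
--                 stripped = stripped[0].upper() + stripped[1:]
--             return stripped
--     return clean
-- ===== SOURCE B (Python) =====
-- import re
--
-- # One anchored, case-insensitive regex: the filler alternatives in A's order,
-- # followed greedily by the separator characters A lstrips.
-- _FILLER_RE = re.compile(r"(?:okay,|okay |ok,|alright,|let's see|lets see|hmm,)[ ,.\-:;…]*", re.IGNORECASE)
--
-- def strip_direct_selfhood_filler_prefix(paragraph: str) -> str:
--     clean = str(paragraph or "").strip()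
--     m = _FILLER_RE.match(clean)
--     if m is None:
--         return clean
--     rest = clean[m.end():]
--     return rest[0].upper() + rest[1:] if rest and rest[0].islower() else rest
-- ===== Notes on version B (the rewrite author's own statement) =====
-- stated objective: idiomatic
-- what changed: Replaced the explicit loop over the filler-prefix tuple (slice + lstrip + capitalize inside the loop) by one precompiled anchored case-insensitive regex that matches prefix-plus-separators in a single step, slicing the remainder at the match end offset.
import Mathlib
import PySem

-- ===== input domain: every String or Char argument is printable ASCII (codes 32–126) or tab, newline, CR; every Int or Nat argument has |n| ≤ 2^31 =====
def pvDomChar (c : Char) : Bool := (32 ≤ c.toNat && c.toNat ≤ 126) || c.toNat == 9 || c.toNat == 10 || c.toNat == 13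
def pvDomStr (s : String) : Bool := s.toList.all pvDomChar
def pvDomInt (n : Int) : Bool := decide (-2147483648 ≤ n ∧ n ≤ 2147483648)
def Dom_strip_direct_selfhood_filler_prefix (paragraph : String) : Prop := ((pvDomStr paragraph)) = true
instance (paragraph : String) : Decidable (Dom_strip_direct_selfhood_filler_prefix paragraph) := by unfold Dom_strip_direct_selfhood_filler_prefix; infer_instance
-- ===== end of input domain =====

-- B replaces A's explicit loop over the filler tuple by one precompiled anchored
-- case-insensitive regex whose match-end offset is sliced off in a single step (idiomatic).

-- ===== PORT A =====
-- the module constant _DIRECT_SELFHOOD_ENGLISH_FILLER_PREFIXES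
def pvFillerPrefixes : List (List Char) :=
  ["okay,".toList, "okay ".toList, "ok,".toList, "alright,".toList,
   "let's see".toList, "lets see".toList, "hmm,".toList]

-- the character set of A's lstrip(" ,.-:;…")
def pvAStripSet : List Char := [' ', ',', '.', '-', ':', ';', '…']

-- A's for-loop; clean[len(prefix):] is PySem slice, and .lstrip(" ,.-:;…") is
-- ported by hand as dropWhile of membership in the set (exact: Python's
-- lstrip(chars) removes exactly the leading characters contained in chars).
def pvALoop (clean lowered : List Char) : List (List Char) → List Char
  | [] => clean
  | p :: ps =>
    if PySem.Chars.startswith lowered p = true then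
      match (PySem.List.slice clean (some (p.length : Int)) none).dropWhile
              (fun c => c ∈ pvAStripSet) with
      | [] => []
      | c :: rest =>
        if PySem.Chars.islower c = true then PySem.Chars.upperChar c :: rest
        else c :: rest
    else pvALoop clean lowered ps

def strip_direct_selfhood_filler_prefix (paragraph : String) : String :=
  let clean := PySem.Chars.strip paragraph.toList
  if clean = [] then ""
  else String.ofList (pvALoop clean (PySem.Chars.lower clean) pvFillerPrefixes)

-- ===== PORT B =====
-- the regex's alternatives (in pattern order, all lowercase) and its trailing
-- character class [ ,.\-:;…]
def pvFillerAlts : List (List Char) :=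
  ["okay,".toList, "okay ".toList, "ok,".toList, "alright,".toList,
   "let's see".toList, "lets see".toList, "hmm,".toList]

def pvSepClass : List Char := [' ', ',', '.', '-', ':', ';', '…']

-- _FILLER_RE.match(clean), ported by hand as this anchored pattern's exact
-- semantics: alternatives tried left to right (IGNORECASE over all-lowercase
-- literals = prefix test against the lowered subject), then the greedy
-- character class; the result is the match's end offset, none = no match.
def pvFillerMatchEnd (clean : List Char) : Option Nat :=
  pvFillerAlts.findSome? fun alt =>
    if PySem.Chars.startswith (PySem.Chars.lower clean) alt = true then
      some (alt.length + ((clean.drop alt.length).takeWhile (fun c => c ∈ pvSepClass)).length)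
    else none

def strip_direct_selfhood_filler_prefix_alt (paragraph : String) : String :=
  let clean := PySem.Chars.strip paragraph.toList
  match pvFillerMatchEnd clean with
  | none => String.ofList clean
  | some e =>
    match clean.drop e with
    | [] => ""
    | c :: rest =>
      if PySem.Chars.islower c = true then String.ofList (PySem.Chars.upperChar c :: rest)
      else String.ofList (c :: rest)

-- ===== PRECONDITION & SPEC =====
def Spec_strip_direct_selfhood_filler_prefix (paragraph : String) (out : String) : Prop := out = strip_direct_selfhood_filler_prefix_alt paragraph
instance (paragraph : String) (out : String) : Decidable (Spec_strip_direct_selfhood_filler_prefix paragraph out) := by unfold Spec_strip_direct_selfhood_filler_prefix; infer_instance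

-- ===== CLAIM (what is proved, stated in full; the proofs are below) =====
def Claim_equal_strip_direct_selfhood_filler_prefix : Prop := ∀ (paragraph : String), Dom_strip_direct_selfhood_filler_prefix paragraph → Spec_strip_direct_selfhood_filler_prefix paragraph (strip_direct_selfhood_filler_prefix paragraph)

-- ===== LEMMAS AND PROOFS =====

lemma pv_dropWhile_eq_drop_len_takeWhile (l : List Char) (p : Char → Bool) :
    l.dropWhile p = l.drop (l.takeWhile p).length := by
  induction l with
  | nil => rfl
  | cons c t ih => by_cases h : p c <;> simp [h, ih]

-- A's loop over any prefix list equals B's match-end-then-slice computation.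
lemma pv_loop_eq_matchEnd (clean : List Char) (ps : List (List Char)) :
    pvALoop clean (PySem.Chars.lower clean) ps =
      match ps.findSome? (fun alt =>
          if PySem.Chars.startswith (PySem.Chars.lower clean) alt = true then
            some (alt.length + ((clean.drop alt.length).takeWhile (fun c => c ∈ pvSepClass)).length)
          else none) with
      | none => clean
      | some e =>
        match clean.drop e with
        | [] => []
        | c :: rest =>
          if PySem.Chars.islower c = true then PySem.Chars.upperChar c :: rest
          else c :: rest := by
  induction ps with
  | nil => rfl
  | cons p ps ih =>
    by_cases h : PySem.Chars.startswith (PySem.Chars.lower clean) p = true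
    · simp only [pvALoop, List.findSome?_cons, if_pos h]
      rw [PySem.List.slice_from_natCast,
          pv_dropWhile_eq_drop_len_takeWhile, List.drop_drop]
      have hset : pvAStripSet = pvSepClass := rfl
      rw [hset]
    · simp only [pvALoop, List.findSome?_cons, if_neg h]
      simpa using ih

-- the same, instantiated at the shared prefix list and folded into pvFillerMatchEnd
lemma pv_loop_alt (clean : List Char) :
    pvALoop clean (PySem.Chars.lower clean) pvFillerPrefixes =
      match pvFillerMatchEnd clean with
      | none => clean
      | some e =>
        match clean.drop e with
        | [] => []
        | c :: rest =>
          if PySem.Chars.islower c = true then PySem.Chars.upperChar c :: rest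
          else c :: rest :=
  pv_loop_eq_matchEnd clean pvFillerAlts

lemma pv_main (clean : List Char) :
    (if clean = [] then "" else String.ofList (pvALoop clean (PySem.Chars.lower clean) pvFillerPrefixes)) =
      (match pvFillerMatchEnd clean with
      | none => String.ofList clean
      | some e =>
        match clean.drop e with
        | [] => ""
        | c :: rest =>
          if PySem.Chars.islower c = true then String.ofList (PySem.Chars.upperChar c :: rest)
          else String.ofList (c :: rest)) := by
  by_cases hnil : clean = []
  · subst hnil; decide
  · rw [if_neg hnil, pv_loop_alt clean]
    cases pvFillerMatchEnd clean with
    | none => rfl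
    | some e =>
      show String.ofList (match clean.drop e with
          | [] => []
          | c :: rest =>
            if PySem.Chars.islower c = true then PySem.Chars.upperChar c :: rest
            else c :: rest) =
        (match clean.drop e with
          | [] => ""
          | c :: rest =>
            if PySem.Chars.islower c = true then String.ofList (PySem.Chars.upperChar c :: rest)
            else String.ofList (c :: rest))
      cases clean.drop e with
      | nil => rfl
      | cons c rest =>
        exact apply_ite String.ofList (PySem.Chars.islower c = true)
          (PySem.Chars.upperChar c :: rest) (c :: rest)

-- ===== VERDICT (by name: the statement is the Claim_ definition above) =====
theorem strip_direct_selfhood_filler_prefix_spec : Claim_equal_strip_direct_selfhood_filler_prefix := by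
  intro paragraph _
  unfold Spec_strip_direct_selfhood_filler_prefix
  unfold strip_direct_selfhood_filler_prefix strip_direct_selfhood_filler_prefix_alt
  exact pv_main (PySem.Chars.strip paragraph.toList)
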